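-- pv_equiv track=rewrite | github.com/sajinavi2006/julomvp | mvp/src/juloserver/juloserver/followthemoney/utils.py | spoof_text
-- ===== SOURCE A (Python) =====
-- def spoof_text(text, number):
--     word = []
--     i = 1
--     for char in text:
--         if char == " ":
--             i = 0
--         elif i > 2:
--             char = "*"
--         word.append(char)
--         i+=1
--
--     return ''.join(word)
-- ===== SOURCE B (Python) =====
-- def spoof_text(text, number):
--     return ' '.join(w[:2] + '*' * (len(w) - 2) for w in text.split(' '))
-- ===== Notes on version B (the rewrite author's own statement) =====
-- stated objective: simpler
-- what changed: Replaces A's stateful per-character counter pass (reset on spaces, star when counter > 2) with a word-level decomposition: split on single spaces, map each word w to w[:2] + '*'*(len(w)-2), rejoin with spaces.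
import Mathlib
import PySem

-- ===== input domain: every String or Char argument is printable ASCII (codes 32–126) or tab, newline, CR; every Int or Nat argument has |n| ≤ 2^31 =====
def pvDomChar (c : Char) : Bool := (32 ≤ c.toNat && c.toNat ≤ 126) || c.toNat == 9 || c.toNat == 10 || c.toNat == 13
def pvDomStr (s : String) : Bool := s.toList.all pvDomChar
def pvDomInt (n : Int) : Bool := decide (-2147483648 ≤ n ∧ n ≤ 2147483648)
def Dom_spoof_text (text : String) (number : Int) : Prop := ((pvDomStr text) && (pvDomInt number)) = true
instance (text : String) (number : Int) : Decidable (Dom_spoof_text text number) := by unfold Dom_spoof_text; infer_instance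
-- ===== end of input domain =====

-- B keeps the first two characters of each space-separated word and stars the rest,
-- by split(' ')/map/join instead of A's stateful per-character counter pass (objective: simpler).

-- ===== PORT A =====
-- A: one pass over the characters with a counter i (reset to 0 on a space), appending
-- '*' for characters with i > 2; ported as a foldl over the char list with state (word, i).
-- the loop body: 'if char == " ": i = 0 elif i > 2: char = "*"; word.append(char); i += 1'
def pvStepA (st : List Char × Int) (ch : Char) : List Char × Int :=
  if ch = ' ' then (st.1 ++ [' '], (0 : Int) + 1)
  else if st.2 > 2 then (st.1 ++ ['*'], st.2 + 1)
  else (st.1 ++ [ch], st.2 + 1)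

def spoof_text (text : String) (number : Int) : String :=
  String.mk (text.toList.foldl pvStepA ([], 1)).1

-- ===== PORT B =====
-- Source B's w[:2] + '*' * (len(w) - 2)  (negative repeat count gives '', as in Python)
def pvMaskWord (w : List Char) : List Char :=
  PySem.Chars.slice w none (some 2) ++ List.replicate (((PySem.Chars.len w : Int) - 2).toNat) '*'

-- Source B: ' '.join(w[:2] + '*' * (len(w) - 2) for w in text.split(' ')), via PySem.Chars
def spoof_text_alt (text : String) (number : Int) : String :=
  String.mk (PySem.Chars.join [' '] ((PySem.Chars.splitOn text.toList [' ']).map pvMaskWord))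

-- ===== PRECONDITION & SPEC =====
def Spec_spoof_text (text : String) (number : Int) (out : String) : Prop := out = spoof_text_alt text number
instance (text : String) (number : Int) (out : String) : Decidable (Spec_spoof_text text number out) := by unfold Spec_spoof_text; infer_instance

-- ===== CLAIM (what is proved, stated in full; the proofs are below) =====
def Claim_equal_spoof_text : Prop := ∀ (text : String) (number : Int), Dom_spoof_text text number → Spec_spoof_text text number (spoof_text text number)

-- ===== LEMMAS AND PROOFS =====

-- the character stream A produces, as a structural recursion on the char list
def pvG : Int → List Char → List Char
  | _, [] => []
  | i, c :: cs => if c = ' ' then ' ' :: pvG 1 cs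
                  else (if i > 2 then '*' else c) :: pvG (i + 1) cs

lemma pvFoldl_eq_g (cs : List Char) : ∀ (acc : List Char) (i : Int),
    (cs.foldl pvStepA (acc, i)).1 = acc ++ pvG i cs := by
  induction cs with
  | nil => intro acc i; simp [pvG]
  | cons c cs ih =>
    intro acc i
    rw [List.foldl_cons]
    by_cases hc : c = ' '
    · rw [show pvStepA (acc, i) c = (acc ++ [' '], (0 : Int) + 1) by simp [pvStepA, hc]]
      rw [ih, show (0 : Int) + 1 = 1 by ring]
      simp [pvG, hc]
    · by_cases hi : i > 2
      · rw [show pvStepA (acc, i) c = (acc ++ ['*'], i + 1) by simp [pvStepA, hc, hi]]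
        rw [ih]
        simp [pvG, hc, hi]
      · rw [show pvStepA (acc, i) c = (acc ++ [c], i + 1) by simp [pvStepA, hc, hi]]
        rw [ih]
        simp [pvG, hc, hi]

-- reference split on a single space (split(' ') semantics: empty tokens kept)
def pvSp : List Char → List (List Char)
  | [] => [[]]
  | c :: cs => if c = ' ' then [] :: pvSp cs else (pvSp cs).modifyHead (c :: ·)

lemma pvSp_ne_nil (cs : List Char) : pvSp cs ≠ [] := by
  cases cs with
  | nil => simp [pvSp]
  | cons c cs =>
    simp only [pvSp]
    split
    · simp
    · cases h : pvSp cs with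
      | nil => exact absurd h (pvSp_ne_nil cs)
      | cons w ws => simp

lemma pvGo_eq (fuel : Nat) : ∀ (l cur : List Char) (acc : List (List Char)),
    l.length < fuel →
    PySem.Chars.splitOn.go [' '] fuel l cur acc
      = acc.reverse ++ (pvSp l).modifyHead (cur.reverse ++ ·) := by
  induction fuel with
  | zero => intro l cur acc h; omega
  | succ fuel ih =>
    intro l cur acc h
    cases l with
    | nil => simp [PySem.Chars.splitOn.go, pvSp]
    | cons c rest =>
      by_cases hc : c = ' '
      · subst hc
        rw [PySem.Chars.splitOn.go,
          if_pos (show ([' '].isPrefixOf (' ' :: rest)) = true by simp [List.isPrefixOf])]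
        simp only [List.length_singleton, List.drop_succ_cons, List.drop_zero]
        rw [ih rest [] (cur.reverse :: acc) (by simpa using Nat.lt_of_succ_lt_succ h)]
        simp [pvSp]
        cases hsp : pvSp rest with
        | nil => exact absurd hsp (pvSp_ne_nil rest)
        | cons w ws => simp
      · rw [PySem.Chars.splitOn.go]
        have hpre : ([' '].isPrefixOf (c :: rest)) = false := by
          simp [List.isPrefixOf]; exact fun h' => hc h'.symm
        rw [hpre]
        simp only [Bool.false_eq_true, if_false]
        rw [ih rest (c :: cur) acc (by simpa using Nat.lt_of_succ_lt_succ h)]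
        simp [pvSp, hc]
        cases hsp : pvSp rest with
        | nil => exact absurd hsp (pvSp_ne_nil rest)
        | cons w ws => simp

lemma pvSplitOn_eq (cs : List Char) :
    PySem.Chars.splitOn cs [' '] = pvSp cs := by
  unfold PySem.Chars.splitOn
  rw [pvGo_eq (cs.length + 1) cs [] [] (by omega)]
  cases h : pvSp cs with
  | nil => exact absurd h (pvSp_ne_nil cs)
  | cons w ws => simp

-- masking a word of which k characters were already consumed by A's counter
def pvMaskFrom (k : Nat) (w : List Char) : List Char :=
  w.take (2 - k) ++ List.replicate (w.length - (2 - k)) '*'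

lemma pvMaskFrom_zero (w : List Char) : pvMaskFrom 0 w = pvMaskWord w := by
  have h : (((w.length : Int)) - 2).toNat = w.length - 2 := by omega
  simp only [pvMaskFrom, pvMaskWord, PySem.Chars.slice_eq_listSlice, PySem.Chars.len_eq,
    PySem.List.slice_to w (show (0 : Int) ≤ 2 by norm_num), h, Nat.sub_zero]
  rfl

lemma pvJoin_cons_head (sep : List Char) (x : Char) (a : List Char) (rest : List (List Char)) :
    PySem.Chars.join sep ((x :: a) :: rest) = x :: PySem.Chars.join sep (a :: rest) := by
  cases rest with
  | nil => simp [PySem.Chars.join, List.intercalate]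
  | cons b bs => simp [PySem.Chars.join, List.intercalate]

-- the masked stream, phrased on the split words (head word with k chars already consumed)
def pvJ (k : Nat) : List (List Char) → List Char
  | [] => []
  | w :: ws => PySem.Chars.join [' '] (pvMaskFrom k w :: ws.map pvMaskWord)

lemma pvG_eq_J (cs : List Char) : ∀ (k : Nat),
    pvG ((k : Int) + 1) cs = pvJ k (pvSp cs) := by
  induction cs with
  | nil => intro k; simp [pvG, pvSp, pvJ, PySem.Chars.join, pvMaskFrom, List.intercalate]
  | cons c cs ih =>
    intro k
    by_cases hc : c = ' '
    · subst hc
      have h0 := ih 0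
      simp only [Nat.cast_zero, zero_add] at h0
      cases hsp : pvSp cs with
      | nil => exact absurd hsp (pvSp_ne_nil cs)
      | cons w ws =>
        rw [show pvG ((k : Int) + 1) (' ' :: cs) = ' ' :: pvG 1 cs from by simp [pvG],
          show pvSp (' ' :: cs) = [] :: pvSp cs from by simp [pvSp], h0, hsp]
        have hnil : pvMaskFrom k [] = [] := by simp [pvMaskFrom]
        simp only [pvJ, List.map_cons, hnil, PySem.Chars.join_cons_cons, pvMaskFrom_zero,
          List.nil_append, List.singleton_append]
    · have h1 := ih (k + 1)
      push_cast at h1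
      simp only [pvG, if_neg hc]
      rw [show (k : Int) + 1 + 1 = (k : Int) + 1 + 1 by ring, h1]
      simp only [pvSp, if_neg hc]
      cases hsp : pvSp cs with
      | nil => exact absurd hsp (pvSp_ne_nil cs)
      | cons w ws =>
        simp only [List.modifyHead, pvJ]
        have hmask : pvMaskFrom k (c :: w)
            = (if (k : Int) + 1 > 2 then '*' else c) :: pvMaskFrom (k + 1) w := by
          by_cases hk : 2 ≤ k
          · have h2 : 2 - k = 0 := by omega
            have h3 : 2 - (k + 1) = 0 := by omega
            rw [if_pos (by push_cast; omega)]
            simp [pvMaskFrom, h2, h3, List.replicate_succ]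
          · have h2 : 2 - k = (1 - k) + 1 := by omega
            have h3 : 2 - (k + 1) = 1 - k := by omega
            rw [if_neg (by push_cast; omega)]
            simp only [pvMaskFrom, h2, List.take_succ_cons, List.length_cons,
              List.cons_append, List.cons.injEq, true_and]
            rw [h3, show w.length + 1 - (1 - k + 1) = w.length - (1 - k) from by omega]
        rw [hmask, pvJoin_cons_head]

-- ===== VERDICT (by name: the statement is the Claim_ definition above) =====
theorem spoof_text_spec : Claim_equal_spoof_text := by
  intro text number _
  unfold Spec_spoof_text spoof_text spoof_text_alt
  rw [pvSplitOn_eq]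
  have hf := pvFoldl_eq_g text.toList [] 1
  simp only [hf, List.nil_append]
  have := pvG_eq_J text.toList 0
  simp only [Nat.cast_zero, zero_add] at this
  rw [this]
  cases hsp : pvSp text.toList with
  | nil => exact absurd hsp (pvSp_ne_nil text.toList)
  | cons w ws => simp [pvJ, pvMaskFrom_zero]
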